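-- pv_equiv track=rewrite | github.com/PedroLucasMendes/Course_Firmware | src/echologger/software/main.py | custom_strftime
-- ===== SOURCE A (Python) =====
-- def custom_strftime(format, t):
--     # Dicionário para mapear os códigos de formatação
--     formats = {
--         "%Y": str(t[0]),
--         "%m": '{:02}'.format(t[1]),
--         "%d": '{:02}'.format(t[2]),
--         "%H": '{:02}'.format(t[3]),
--         "%M": '{:02}'.format(t[4]),
--         "%S": '{:02}'.format(t[5]),
--     }
--
--     # Substituir os códigos no formato fornecido
--     for key, value in formats.items():
--         format = format.replace(key, value)
--
--     return format
-- ===== SOURCE B (Python) =====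
-- def custom_strftime(format, t):
--     # Single left-to-right parsing scan (instead of six whole-string replace passes).
--     # All six values are computed eagerly so a short tuple raises IndexError like A.
--     vals = (str(t[0]), '{:02}'.format(t[1]), '{:02}'.format(t[2]),
--             '{:02}'.format(t[3]), '{:02}'.format(t[4]), '{:02}'.format(t[5]))
--
--     def value_of(c):
--         if c == 'Y': return vals[0]
--         if c == 'm': return vals[1]
--         if c == 'd': return vals[2]
--         if c == 'H': return vals[3]
--         if c == 'M': return vals[4]
--         if c == 'S': return vals[5]
--         return None
--
--     out = []
--     i = 0
--     n = len(format)
--     while i < n: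
--         c = format[i]
--         if c == '%' and i + 1 < n:
--             v = value_of(format[i + 1])
--             if v is not None:
--                 out.append(v)
--                 i += 2
--                 continue
--         out.append(c)
--         i += 1
--     return ''.join(out)
-- ===== Notes on version B (the rewrite author's own statement) =====
-- stated objective: alternative
-- what changed: Replaces six sequential whole-string str.replace passes with a single left-to-right scan that parses each '%x' code once via a per-code if-chain over six eagerly computed values.
-- outside the precondition, e.g. on custom_strftime('%Y', (2024,)): A raises IndexError, B raises IndexError
import Mathlib
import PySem

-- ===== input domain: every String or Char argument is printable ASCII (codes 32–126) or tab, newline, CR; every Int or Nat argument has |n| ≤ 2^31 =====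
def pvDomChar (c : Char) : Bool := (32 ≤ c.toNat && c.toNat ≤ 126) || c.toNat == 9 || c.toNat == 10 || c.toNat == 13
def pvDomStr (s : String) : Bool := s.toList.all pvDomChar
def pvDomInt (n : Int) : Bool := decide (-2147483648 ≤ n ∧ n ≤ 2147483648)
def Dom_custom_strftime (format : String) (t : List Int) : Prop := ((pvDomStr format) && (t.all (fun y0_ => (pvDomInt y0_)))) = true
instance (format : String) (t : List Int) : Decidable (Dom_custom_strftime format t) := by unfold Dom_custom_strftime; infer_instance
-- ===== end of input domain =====

-- B replaces A's six sequential whole-string replace passes by a single left-to-right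
-- parsing scan with a per-code if-chain (objective: alternative).

-- ===== PORT A =====
-- the dict literal of A: six formatted values ('{:02}'.format(n) is zfill to width 2 for ints)
def pvFormats (t : List Int) : List (List Char × List Char) :=
  [ (['%', 'Y'], PySem.Int.toChars (PySem.List.pyGetD t 0 0)),
    (['%', 'm'], PySem.Chars.zfill (PySem.Int.toChars (PySem.List.pyGetD t 1 0)) 2),
    (['%', 'd'], PySem.Chars.zfill (PySem.Int.toChars (PySem.List.pyGetD t 2 0)) 2),
    (['%', 'H'], PySem.Chars.zfill (PySem.Int.toChars (PySem.List.pyGetD t 3 0)) 2),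
    (['%', 'M'], PySem.Chars.zfill (PySem.Int.toChars (PySem.List.pyGetD t 4 0)) 2),
    (['%', 'S'], PySem.Chars.zfill (PySem.Int.toChars (PySem.List.pyGetD t 5 0)) 2) ]

-- 'for key, value in formats.items(): format = format.replace(key, value)'
def custom_strftime (format : String) (t : List Int) : String :=
  String.ofList ((pvFormats t).foldl (fun s kv => PySem.Chars.replace s kv.1 kv.2) format.toList)

-- ===== PORT B =====
-- Source B's 'value_of(c)': if-chain mapping a code character to its formatted value
def pvValueOf (t : List Int) (c : Char) : Option (List Char) :=
  if c = 'Y' then some (PySem.Int.toChars (PySem.List.pyGetD t 0 0))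
  else if c = 'm' then some (PySem.Chars.zfill (PySem.Int.toChars (PySem.List.pyGetD t 1 0)) 2)
  else if c = 'd' then some (PySem.Chars.zfill (PySem.Int.toChars (PySem.List.pyGetD t 2 0)) 2)
  else if c = 'H' then some (PySem.Chars.zfill (PySem.Int.toChars (PySem.List.pyGetD t 3 0)) 2)
  else if c = 'M' then some (PySem.Chars.zfill (PySem.Int.toChars (PySem.List.pyGetD t 4 0)) 2)
  else if c = 'S' then some (PySem.Chars.zfill (PySem.Int.toChars (PySem.List.pyGetD t 5 0)) 2)
  else none

-- Source B's while loop: on '%' with a following known code char emit its value and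
-- consume two characters, otherwise emit the current character and consume one
def pvEmit (t : List Int) : List Char → List Char
  | [] => []
  | c :: rest =>
    if c = '%' then
      match rest with
      | [] => [c]
      | y :: rest' =>
        match pvValueOf t y with
        | some v => v ++ pvEmit t rest'
        | none => c :: pvEmit t (y :: rest')
    else c :: pvEmit t rest

def custom_strftime_alt (format : String) (t : List Int) : String :=
  String.ofList (pvEmit t format.toList)

-- ===== PRECONDITION & SPEC =====
-- Pre_ excludes only tuples with fewer than 6 entries, on which the Python A raises IndexError.
def Pre_custom_strftime (format : String) (t : List Int) : Prop := 6 ≤ t.length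
instance (format : String) (t : List Int) : Decidable (Pre_custom_strftime format t) := by unfold Pre_custom_strftime; infer_instance
def pvWitness_custom_strftime : String × List Int := ("%Y-%m-%d %H:%M:%S", [2024, 1, 2, 3, 4, 5])
def Spec_custom_strftime (format : String) (t : List Int) (out : String) : Prop := out = custom_strftime_alt format t
instance (format : String) (t : List Int) (out : String) : Decidable (Spec_custom_strftime format t out) := by unfold Spec_custom_strftime; infer_instance

-- ===== CLAIM (what is proved, stated in full; the proofs are below) =====
def Claim_equal_custom_strftime : Prop := ∀ (format : String) (t : List Int), Dom_custom_strftime format t → Pre_custom_strftime format t → Spec_custom_strftime format t (custom_strftime format t)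

-- ===== LEMMAS AND PROOFS =====

-- proof-side view of A's table as a first-match lookup
def pvLookup : List (List Char × List Char) → List Char → Option (List Char)
  | [], _ => none
  | (k, v) :: rest, code => if code = k then some v else pvLookup rest code

-- proof-side scanner over an arbitrary table, bridging A's fold of replaces to B's emitter
def pvScan (fm : List (List Char × List Char)) : List Char → List Char
  | [] => []
  | c :: rest =>
    if c = '%' then
      match rest with
      | [] => [c]
      | y :: rest' =>
        match pvLookup fm [c, y] with
        | some v => v ++ pvScan fm rest'
        | none => c :: pvScan fm (y :: rest')
    else c :: pvScan fm rest

lemma pvGo_zero (old new : List Char) (l acc : List Char) :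
    PySem.Chars.replace.go old new 0 l acc = acc.reverse ++ l := by
  cases l <;> rfl

lemma pvGo_nil (old new : List Char) (fuel : Nat) (acc : List Char) :
    PySem.Chars.replace.go old new fuel [] acc = acc.reverse := by
  cases fuel <;> simp [PySem.Chars.replace.go]

lemma pvGo_cons_not (old new : List Char) (fuel : Nat) (c : Char) (t acc : List Char)
    (h : old.isPrefixOf (c :: t) = false) :
    PySem.Chars.replace.go old new (fuel + 1) (c :: t) acc =
      PySem.Chars.replace.go old new fuel t (c :: acc) := by
  simp [PySem.Chars.replace.go, h]

lemma pvGo_cons_match (old new : List Char) (fuel : Nat) (c : Char) (t acc : List Char)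
    (h : old.isPrefixOf (c :: t) = true) :
    PySem.Chars.replace.go old new (fuel + 1) (c :: t) acc =
      PySem.Chars.replace.go old new fuel ((c :: t).drop old.length) (new.reverse ++ acc) := by
  simp [PySem.Chars.replace.go, h]

lemma pvGo_acc (old new : List Char) :
    ∀ (fuel : Nat) (l acc : List Char),
      PySem.Chars.replace.go old new fuel l acc =
        acc.reverse ++ PySem.Chars.replace.go old new fuel l [] := by
  intro fuel
  induction fuel with
  | zero => intro l acc; simp [pvGo_zero]
  | succ f ih =>
    intro l acc
    cases l with
    | nil => simp [pvGo_nil]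
    | cons c t =>
      by_cases h : old.isPrefixOf (c :: t) = true
      · rw [pvGo_cons_match _ _ _ _ _ _ h, pvGo_cons_match _ _ _ _ _ _ h,
          ih _ (new.reverse ++ acc), ih _ (new.reverse ++ [])]
        simp
      · have h' : old.isPrefixOf (c :: t) = false := by
          cases hx : old.isPrefixOf (c :: t) <;> simp_all
        rw [pvGo_cons_not _ _ _ _ _ _ h', pvGo_cons_not _ _ _ _ _ _ h',
          ih _ (c :: acc), ih _ [c]]
        simp

lemma pvGo_fuel (old new : List Char) (hold : old ≠ []) :
    ∀ (n : Nat) (l : List Char), l.length ≤ n →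
      ∀ f1 f2 : Nat, l.length ≤ f1 → l.length ≤ f2 →
        PySem.Chars.replace.go old new f1 l [] = PySem.Chars.replace.go old new f2 l [] := by
  intro n
  induction n with
  | zero =>
    intro l hl f1 f2 _ _
    have : l = [] := List.eq_nil_of_length_eq_zero (Nat.le_zero.mp hl)
    subst this; simp [pvGo_nil]
  | succ n ih =>
    intro l hl f1 f2 h1 h2
    cases l with
    | nil => simp [pvGo_nil]
    | cons c t =>
      simp only [List.length_cons] at hl h1 h2
      obtain ⟨g1, rfl⟩ : ∃ g, f1 = g + 1 := ⟨f1 - 1, by omega⟩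
      obtain ⟨g2, rfl⟩ : ∃ g, f2 = g + 1 := ⟨f2 - 1, by omega⟩
      by_cases h : old.isPrefixOf (c :: t) = true
      · rw [pvGo_cons_match _ _ _ _ _ _ h, pvGo_cons_match _ _ _ _ _ _ h,
          pvGo_acc, pvGo_acc old new g2]
        have hol : 1 ≤ old.length := by cases old <;> simp_all
        have hlen : ((c :: t).drop old.length).length ≤ n := by
          simp only [List.length_drop, List.length_cons] at *; omega
        rw [ih _ hlen g1 g2
          (by simp only [List.length_drop, List.length_cons] at *; omega)
          (by simp only [List.length_drop, List.length_cons] at *; omega)]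
      · have h' : old.isPrefixOf (c :: t) = false := by
          cases hx : old.isPrefixOf (c :: t) <;> simp_all
        rw [pvGo_cons_not _ _ _ _ _ _ h', pvGo_cons_not _ _ _ _ _ _ h',
          pvGo_acc, pvGo_acc old new g2]
        rw [ih t (by simp at hl; omega) g1 g2 (by simp at h1; omega) (by simp at h2; omega)]

lemma pvReplace_nil (old new : List Char) (hold : old ≠ []) :
    PySem.Chars.replace [] old new = [] := by
  simp [PySem.Chars.replace, hold, pvGo_zero]

lemma pvReplace_not (old new : List Char) (c : Char) (t : List Char) (hold : old ≠ [])
    (h : old.isPrefixOf (c :: t) = false) :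
    PySem.Chars.replace (c :: t) old new = c :: PySem.Chars.replace t old new := by
  simp only [PySem.Chars.replace, List.isEmpty_iff, hold, List.length_cons]
  rw [pvGo_cons_not _ _ _ _ _ _ h, pvGo_acc]
  rfl

lemma pvReplace_match (old new : List Char) (l : List Char) (hold : old ≠ [])
    (h : old.isPrefixOf l = true) :
    PySem.Chars.replace l old new = new ++ PySem.Chars.replace (l.drop old.length) old new := by
  cases l with
  | nil =>
    cases old with
    | nil => exact absurd rfl hold
    | cons a b => simp [List.isPrefixOf] at h
  | cons c t =>
    simp only [PySem.Chars.replace, List.isEmpty_iff, hold, List.length_cons]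
    rw [pvGo_cons_match _ _ _ _ _ _ h, pvGo_acc]
    simp only [List.reverse_reverse, List.append_nil]
    have hol : 1 ≤ old.length := by cases old <;> simp_all
    simp only [reduceIte]
    congr 1
    exact (pvGo_fuel old new hold t.length ((c :: t).drop old.length)
      (by simp only [List.length_drop, List.length_cons]; omega)
      ((c :: t).drop old.length).length t.length (le_refl _)
      (by simp only [List.length_drop, List.length_cons]; omega)).symm

lemma pvSkip1 (k : Char) (v : List Char) (c : Char) (x : List Char) (hc : c ≠ '%') :
    PySem.Chars.replace (c :: x) ['%', k] v = c :: PySem.Chars.replace x ['%', k] v := by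
  apply pvReplace_not _ _ _ _ (by simp)
  simp [List.isPrefixOf]
  intro h; exact absurd h.symm hc

lemma pvSkipPct (k : Char) (v : List Char) (T : List Char) (hk : T.head? ≠ some k) :
    PySem.Chars.replace ('%' :: T) ['%', k] v = '%' :: PySem.Chars.replace T ['%', k] v := by
  apply pvReplace_not _ _ _ _ (by simp)
  cases T with
  | nil => simp [List.isPrefixOf]
  | cons a b =>
    simp [List.isPrefixOf]
    intro h; exact absurd (by simp [h]) hk

lemma pvMatch2 (k : Char) (v : List Char) (x : List Char) :
    PySem.Chars.replace ('%' :: k :: x) ['%', k] v = v ++ PySem.Chars.replace x ['%', k] v := by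
  have := pvReplace_match ['%', k] v ('%' :: k :: x) (by simp) (by simp [List.isPrefixOf])
  simpa using this

lemma pvHead_replace (old new : List Char) (hold : old ≠ []) (hnew : new ≠ []) (l : List Char) :
    (PySem.Chars.replace l old new).head? = l.head? ∨
      (PySem.Chars.replace l old new).head? = new.head? := by
  cases l with
  | nil => left; rw [pvReplace_nil _ _ hold]
  | cons c t =>
    by_cases h : old.isPrefixOf (c :: t) = true
    · right
      rw [pvReplace_match _ _ _ hold h]
      cases new with
      | nil => exact absurd rfl hnew
      | cons a b => simp
    · left
      rw [pvReplace_not _ _ _ _ hold (by cases hx : old.isPrefixOf (c :: t) <;> simp_all)]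
      simp

lemma pvReplace_append (k : Char) (v : List Char) (w z : List Char) (hw : '%' ∉ w) :
    PySem.Chars.replace (w ++ z) ['%', k] v = w ++ PySem.Chars.replace z ['%', k] v := by
  induction w with
  | nil => simp
  | cons a w' ih =>
    have ha : a ≠ '%' := by intro h; exact hw (by simp [h])
    simp only [List.cons_append]
    rw [pvSkip1 _ _ _ _ ha, ih (by intro h; exact hw (by simp [h]))]

def pvValish (c : Char) : Prop := c = '-' ∨ c.isDigit = true

lemma pvDigitChar10_valish (n : Nat) : pvValish (Nat.digitChar (n % 10)) := by
  have h : n % 10 < 10 := Nat.mod_lt _ (by norm_num)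
  unfold pvValish
  interval_cases h : n % 10 <;> decide

lemma pvToDigitsCore_valish (fuel n : Nat) (acc : List Char)
    (hacc : ∀ c ∈ acc, pvValish c) :
    ∀ c ∈ Nat.toDigitsCore 10 fuel n acc, pvValish c := by
  induction fuel generalizing n acc with
  | zero => simpa [Nat.toDigitsCore] using hacc
  | succ f ih =>
    simp only [Nat.toDigitsCore]
    split
    · intro c hc
      rcases List.mem_cons.mp hc with h | h
      · subst h; exact pvDigitChar10_valish _
      · exact hacc _ h
    · exact ih _ _ (by
        intro c hc
        rcases List.mem_cons.mp hc with h | h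
        · subst h; exact pvDigitChar10_valish _
        · exact hacc _ h)

lemma pvToDigitsCore_len (b fuel n : Nat) (acc : List Char) :
    acc.length ≤ (Nat.toDigitsCore b fuel n acc).length := by
  induction fuel generalizing n acc with
  | zero => simp [Nat.toDigitsCore]
  | succ f ih =>
    simp only [Nat.toDigitsCore]
    split
    · simp
    · exact le_trans (by simp) (ih _ (Nat.digitChar (n % b) :: acc))

lemma pvToDigits_valish (n : Nat) : ∀ c ∈ Nat.toDigits 10 n, pvValish c :=
  pvToDigitsCore_valish _ _ _ (by simp)

lemma pvToDigits_ne_nil (b n : Nat) : Nat.toDigits b n ≠ [] := by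
  unfold Nat.toDigits
  simp only [Nat.toDigitsCore]
  split
  · simp
  · intro h
    have := pvToDigitsCore_len b n (n / b) [Nat.digitChar (n % b)]
    rw [h] at this; simp at this

lemma pvToChars_valish (n : Int) : ∀ c ∈ PySem.Int.toChars n, pvValish c := by
  unfold PySem.Int.toChars
  split
  · intro c hc
    rcases List.mem_cons.mp hc with h | h
    · subst h; exact Or.inl rfl
    · exact pvToDigits_valish _ _ h
  · exact pvToDigits_valish _

lemma pvToChars_ne_nil (n : Int) : PySem.Int.toChars n ≠ [] := by
  unfold PySem.Int.toChars
  split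
  · simp
  · exact pvToDigits_ne_nil _ _

lemma pvZfill_valish (cs : List Char) (w : Int) (h : ∀ c ∈ cs, pvValish c) :
    ∀ c ∈ PySem.Chars.zfill cs w, pvValish c := by
  unfold PySem.Chars.zfill
  split
  · exact h
  · split
    · split_ifs with hc
      · intro c hcm
        rcases List.mem_cons.mp hcm with h1 | h1
        · subst h1; exact h _ (by simp)
        · rcases List.mem_append.mp h1 with h2 | h2
          · rw [List.eq_of_mem_replicate h2]; exact Or.inr (by decide)
          · exact h _ (by simp [h2])
      · intro c hcm
        rcases List.mem_append.mp hcm with h2 | h2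
        · rw [List.eq_of_mem_replicate h2]; exact Or.inr (by decide)
        · exact h _ h2
    · intro c hcm
      rw [List.eq_of_mem_replicate hcm]; exact Or.inr (by decide)

lemma pvZfill_ne_nil (cs : List Char) (w : Int) (h : cs ≠ []) :
    PySem.Chars.zfill cs w ≠ [] := by
  unfold PySem.Chars.zfill
  split
  · exact h
  · rename_i hw
    split
    · split_ifs <;> simp
    · simp at hw
      intro hx
      rw [List.eq_nil_iff_length_eq_zero] at hx
      simp at hx; omega

lemma pvValish_ne_pct (v : List Char) (hv : ∀ c ∈ v, pvValish c) : '%' ∉ v := by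
  intro h
  rcases hv _ h with h1 | h1
  · exact absurd h1 (by decide)
  · exact absurd h1 (by decide)

lemma pvValish_head_ne (v : List Char) (hv : ∀ c ∈ v, pvValish c) (k : Char)
    (hk : k ≠ '-') (hk2 : k.isDigit = false) : v.head? ≠ some k := by
  cases v with
  | nil => simp
  | cons a b =>
    simp only [List.head?_cons]
    intro h
    injection h with h
    subst h
    rcases hv a (by simp) with h1 | h1
    · exact hk h1
    · rw [h1] at hk2; simp at hk2

-- Good fm: shape invariant of the format table
def pvGood (fm : List (List Char × List Char)) : Prop :=
  ∀ kv ∈ fm, ∃ k, kv.1 = ['%', k] ∧ k ≠ '%' ∧ k ≠ '-' ∧ k.isDigit = false ∧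
    kv.2 ≠ [] ∧ ∀ c ∈ kv.2, pvValish c

def pvFoldRep (fm : List (List Char × List Char)) (l : List Char) : List Char :=
  fm.foldl (fun s kv => PySem.Chars.replace s kv.1 kv.2) l

lemma pvFoldRep_nil (fm : List (List Char × List Char)) (hfm : pvGood fm) :
    pvFoldRep fm [] = [] := by
  induction fm with
  | nil => rfl
  | cons e fm' ih =>
    obtain ⟨k, hk, _⟩ := hfm e (by simp)
    show pvFoldRep fm' (PySem.Chars.replace [] e.1 e.2) = []
    rw [hk, pvReplace_nil _ _ (by simp)]
    exact ih (fun kv h => hfm kv (by simp [h]))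

lemma pvFoldRep_cons_not (fm : List (List Char × List Char)) (hfm : pvGood fm)
    (c : Char) (hc : c ≠ '%') : ∀ x, pvFoldRep fm (c :: x) = c :: pvFoldRep fm x := by
  induction fm with
  | nil => intro x; rfl
  | cons e fm' ih =>
    intro x
    obtain ⟨k, hk, _⟩ := hfm e (by simp)
    show pvFoldRep fm' (PySem.Chars.replace (c :: x) e.1 e.2) = _
    rw [hk, pvSkip1 _ _ _ _ hc,
      show pvFoldRep (e :: fm') x = pvFoldRep fm' (PySem.Chars.replace x e.1 e.2) from rfl, hk]
    exact ih (fun kv h => hfm kv (by simp [h])) _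

lemma pvFoldRep_append (fm : List (List Char × List Char)) (hfm : pvGood fm)
    (w : List Char) (hw : '%' ∉ w) : ∀ z, pvFoldRep fm (w ++ z) = w ++ pvFoldRep fm z := by
  induction fm with
  | nil => intro z; rfl
  | cons e fm' ih =>
    intro z
    obtain ⟨k, hk, _, _, _, _, _⟩ := hfm e (by simp)
    show pvFoldRep fm' (PySem.Chars.replace (w ++ z) e.1 e.2) = _
    rw [hk, pvReplace_append _ _ _ _ hw,
      show pvFoldRep (e :: fm') z = pvFoldRep fm' (PySem.Chars.replace z e.1 e.2) from rfl, hk]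
    exact ih (fun kv h => hfm kv (by simp [h])) _

lemma pvFoldRep_pct (fm : List (List Char × List Char)) (hfm : pvGood fm) :
    ∀ T, (∀ kv ∈ fm, ∀ k, kv.1 = ['%', k] → T.head? ≠ some k) →
      pvFoldRep fm ('%' :: T) = '%' :: pvFoldRep fm T := by
  induction fm with
  | nil => intro T _; rfl
  | cons e fm' ih =>
    intro T hT
    obtain ⟨k, hk, hk1, hk2, hk3, hv1, hv2⟩ := hfm e (by simp)
    show pvFoldRep fm' (PySem.Chars.replace ('%' :: T) e.1 e.2) = _
    rw [hk, pvSkipPct _ _ _ (hT e (by simp) k hk),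
      show pvFoldRep (e :: fm') T = pvFoldRep fm' (PySem.Chars.replace T e.1 e.2) from rfl, hk]
    refine ih (fun kv h => hfm kv (by simp [h])) _ ?_
    intro kv hkv k' hk'
    rcases pvHead_replace ['%', k] e.2 (by simp) hv1 T with h | h
    · rw [h]; exact hT kv (by simp [hkv]) k' hk'
    · rw [h]
      obtain ⟨k2, hkk, _, hne2, hne3, _, _⟩ := hfm kv (by simp [hkv])
      rw [hk'] at hkk
      have : k' = k2 := by simpa using hkk
      subst this
      exact pvValish_head_ne _ hv2 _ hne2 hne3

lemma pvLookup_none (fm : List (List Char × List Char)) (code : List Char)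
    (h : pvLookup fm code = none) : ∀ kv ∈ fm, kv.1 ≠ code := by
  induction fm with
  | nil => simp
  | cons e fm' ih =>
    intro kv hkv
    simp only [pvLookup] at h
    split at h
    · exact absurd h (by simp)
    · rcases List.mem_cons.mp hkv with h1 | h1
      · subst h1; rename_i hne; intro hx; exact hne hx.symm
      · exact ih h kv h1

lemma pvLookup_key_ne_pct (fm : List (List Char × List Char)) (hfm : pvGood fm)
    (y : Char) (v : List Char) (hlook : pvLookup fm ['%', y] = some v) : y ≠ '%' := by
  induction fm with
  | nil => simp [pvLookup] at hlook
  | cons e fm' ih =>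
    simp only [pvLookup] at hlook
    obtain ⟨k, hk, hka, _, _, _, _⟩ := hfm e (by simp)
    split at hlook
    · rename_i heq
      rw [hk] at heq
      have : y = k := by simpa using heq
      subst this; exact hka
    · exact ih (fun kv h => hfm kv (by simp [h])) hlook

lemma pvFoldRep_some (fm : List (List Char × List Char)) (hfm : pvGood fm)
    (y : Char) (v : List Char) (hlook : pvLookup fm ['%', y] = some v) :
    ∀ x, pvFoldRep fm ('%' :: y :: x) = v ++ pvFoldRep fm x := by
  induction fm with
  | nil => simp [pvLookup] at hlook
  | cons e fm' ih =>
    intro x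
    obtain ⟨k, hk, hk1, hk2, hk3, hv1, hv2⟩ := hfm e (by simp)
    have hgood' : pvGood fm' := fun kv h => hfm kv (by simp [h])
    simp only [pvLookup] at hlook
    rw [show pvFoldRep (e :: fm') ('%' :: y :: x) =
      pvFoldRep fm' (PySem.Chars.replace ('%' :: y :: x) e.1 e.2) from rfl,
      show pvFoldRep (e :: fm') x = pvFoldRep fm' (PySem.Chars.replace x e.1 e.2) from rfl, hk]
    split at hlook
    · rename_i heq
      have hy : y = k := by rw [hk] at heq; simpa using heq
      have hv : v = e.2 := by injection hlook with h; exact h.symm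
      subst hy; subst hv
      rw [pvMatch2]
      exact pvFoldRep_append fm' hgood' _ (pvValish_ne_pct _ hv2) _
    · rename_i hne
      have hy : y ≠ k := by rw [hk] at hne; intro h; exact hne (by simp [h])
      have hypct : y ≠ '%' := pvLookup_key_ne_pct fm' hgood' y v hlook
      rw [pvSkipPct _ _ _ (by simp [hy]), pvSkip1 _ _ _ _ hypct]
      exact ih hgood' hlook _

lemma pvMain (fm : List (List Char × List Char)) (hfm : pvGood fm) :
    ∀ (n : Nat) (l : List Char), l.length ≤ n → pvFoldRep fm l = pvScan fm l := by
  intro n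
  induction n with
  | zero =>
    intro l hl
    have : l = [] := List.eq_nil_of_length_eq_zero (Nat.le_zero.mp hl)
    subst this
    rw [pvFoldRep_nil fm hfm]; rfl
  | succ n ih =>
    intro l hl
    cases l with
    | nil => rw [pvFoldRep_nil fm hfm]; rfl
    | cons c rest =>
      simp only [List.length_cons] at hl
      by_cases hc : c = '%'
      · subst hc
        cases rest with
        | nil =>
          rw [pvFoldRep_pct fm hfm [] (by simp), pvFoldRep_nil fm hfm]
          rfl
        | cons y rest' =>
          simp only [List.length_cons] at hl
          cases hlook : pvLookup fm ['%', y] with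
          | some v =>
            rw [pvFoldRep_some fm hfm y v hlook rest', ih rest' (by omega)]
            conv_rhs => rw [pvScan.eq_def]
            simp [hlook]
          | none =>
            have hy := pvLookup_none fm ['%', y] hlook
            rw [pvFoldRep_pct fm hfm (y :: rest') ?hcond, ih (y :: rest') (by simp; omega)]
            · conv_rhs => rw [pvScan.eq_def]
              simp [hlook]
            case hcond =>
              intro kv hkv k hk
              simp only [List.head?_cons]
              intro h
              injection h with h
              subst h
              exact hy kv hkv (by rw [hk])
      · rw [pvFoldRep_cons_not fm hfm c hc rest, ih rest (by omega)]
        conv_rhs => rw [pvScan.eq_def]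
        simp [hc]

lemma pvGood_formats (t : List Int) : pvGood (pvFormats t) := by
  intro kv hkv
  simp only [pvFormats, List.mem_cons, List.not_mem_nil, or_false] at hkv
  rcases hkv with h | h | h | h | h | h <;> subst h <;>
    refine ⟨_, rfl, by decide, by decide, by decide, ?_, ?_⟩
  · exact pvToChars_ne_nil _
  · exact pvToChars_valish _
  all_goals first
    | exact pvZfill_ne_nil _ _ (pvToChars_ne_nil _)
    | exact pvZfill_valish _ _ (pvToChars_valish _)

-- bridge: a lookup of '%y' in A's table is exactly B's if-chain on y
lemma pvLookup_formats (t : List Int) (y : Char) :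
    pvLookup (pvFormats t) ['%', y] = pvValueOf t y := by
  simp only [pvFormats, pvLookup, pvValueOf, List.cons.injEq, and_true, true_and]

-- bridge: the proof-side scanner on A's table computes exactly B's emitter
lemma pvScan_eq_emit (t : List Int) :
    ∀ (n : Nat) (l : List Char), l.length ≤ n → pvScan (pvFormats t) l = pvEmit t l := by
  intro n
  induction n with
  | zero =>
    intro l hl
    have : l = [] := List.eq_nil_of_length_eq_zero (Nat.le_zero.mp hl)
    subst this; rfl
  | succ n ih =>
    intro l hl
    cases l with
    | nil => rfl
    | cons c rest =>
      simp only [List.length_cons] at hl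
      rw [pvScan.eq_def, pvEmit.eq_def]
      by_cases hc : c = '%'
      · subst hc
        cases rest with
        | nil => simp
        | cons y rest' =>
          simp only [List.length_cons] at hl
          simp only [pvLookup_formats]
          cases hv : pvValueOf t y with
          | some v => simp [ih rest' (by omega)]
          | none => simp [ih (y :: rest') (by simp; omega)]
      · simp [hc, ih rest (by omega)]

-- ===== VERDICT (by name: the statement is the Claim_ definition above) =====
theorem custom_strftime_spec : Claim_equal_custom_strftime := by
  intro format t _ _
  unfold Spec_custom_strftime custom_strftime custom_strftime_alt
  rw [show (pvFormats t).foldl (fun s kv => PySem.Chars.replace s kv.1 kv.2) format.toList =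
    pvFoldRep (pvFormats t) format.toList from rfl,
    pvMain (pvFormats t) (pvGood_formats t) format.toList.length _ (le_refl _),
    pvScan_eq_emit t format.toList.length _ (le_refl _)]
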